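-- pv_equiv track=rewrite | github.com/RyanYCT/bdo-market-insights | analyzeData/lambda_function.py | _is_route_match
-- ===== SOURCE A (Python) =====
-- def _is_route_match(config_route: str, actual_route: str) -> bool:
--     """Check if a parameterized route matches the actual route"""
--     # Split method and path
--     config_method, config_path = config_route.split(":", 1)
--     actual_method, actual_path = actual_route.split(":", 1)
--
--     # Methods must match
--     if config_method != actual_method:
--         return False
--
--     # Check path matching
--     config_parts = config_path.split("/")
--     actual_parts = actual_path.split("/")
--
--     if len(config_parts) != len(actual_parts):
--         return False
--
--     for i, part in enumerate(config_parts):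
--         if "{" in part and "}" in part:
--             # Skip parameter
--             continue
--         elif part != actual_parts[i]:
--             return False
--
--     return True
-- ===== SOURCE B (Python) =====
-- def _is_route_match(config_route: str, actual_route: str) -> bool:
--     """Check if a parameterized route matches the actual route"""
--     config_method, config_path = config_route.split(":", 1)
--     actual_method, actual_path = actual_route.split(":", 1)
--     if config_method != actual_method:
--         return False
--     return _glob_match(_compile(config_path), actual_path)
--
--
-- def _compile(config_path):
--     """Compile the parameterized path into glob tokens:
--     a literal segment string, or None = any run of non-'/' characters."""
--     return [None if ("{" in seg and "}" in seg) else seg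
--             for seg in config_path.split("/")]
--
--
-- def _glob_match(tokens, path):
--     """Match path against the compiled '/'-separated tokens, consuming path
--     left to right (the path itself is never split)."""
--     head, rest = tokens[0], tokens[1:]
--     if head is None:
--         i = 0
--         while i < len(path) and path[i] != "/":
--             i += 1
--     else:
--         if path[:len(head)] != head:
--             return False
--         i = len(head)
--     if not rest:
--         return i == len(path)
--     return i < len(path) and path[i] == "/" and _glob_match(rest, path[i + 1:])
-- ===== Notes on version B (the rewrite author's own statement) =====
-- stated objective: alternative
-- what changed: A splits both paths into segment lists and compares them index by index; B compiles the config path once into glob tokens (literal segment or wildcard) and matches the actual path character by character with a recursive matcher, never splitting the actual path at all.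
import Mathlib
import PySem

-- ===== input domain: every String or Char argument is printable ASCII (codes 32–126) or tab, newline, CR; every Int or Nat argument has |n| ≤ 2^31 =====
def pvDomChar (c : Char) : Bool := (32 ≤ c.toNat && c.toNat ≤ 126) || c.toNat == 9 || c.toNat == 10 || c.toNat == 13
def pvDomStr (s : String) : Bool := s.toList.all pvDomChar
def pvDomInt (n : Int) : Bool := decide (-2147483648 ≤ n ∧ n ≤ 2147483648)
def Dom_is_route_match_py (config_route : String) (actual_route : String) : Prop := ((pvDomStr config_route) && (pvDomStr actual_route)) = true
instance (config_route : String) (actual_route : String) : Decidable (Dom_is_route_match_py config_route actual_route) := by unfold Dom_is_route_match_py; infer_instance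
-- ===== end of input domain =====

-- B compiles the config route into glob tokens (literal segment or wildcard) and matches the actual path
-- character by character, never splitting it — a different algorithm from A's split-both-and-compare-segments loop (alternative; same cost).


-- ===== PORT A =====
-- A's for-loop: 'for i, part in enumerate(config_parts)'; actual_parts[i] is pyGet?
-- (the 'none' branch is unreachable because A checks the lengths first).
def pvLoopA (actual_parts : List String) : Nat → List String → Bool
  | _, [] => true
  | i, part :: rest =>
    if PySem.Str.isIn "{" part && PySem.Str.isIn "}" part then
      pvLoopA actual_parts (i + 1) rest
    else
      match PySem.List.pyGet? actual_parts (i : Int) with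
      | some ap => if part ≠ ap then false else pvLoopA actual_parts (i + 1) rest
      | none => false

def is_route_match_py (config_route : String) (actual_route : String) : Bool :=
  match PySem.Str.splitMax? config_route ":" 1, PySem.Str.splitMax? actual_route ":" 1 with
  | some [config_method, config_path], some [actual_method, actual_path] =>
    if config_method ≠ actual_method then false
    else
      match PySem.Str.split? config_path "/", PySem.Str.split? actual_path "/" with
      | some config_parts, some actual_parts =>
        if config_parts.length ≠ actual_parts.length then false
        else pvLoopA actual_parts 0 config_parts
      | _, _ => false   -- unreachable: "/" ≠ ""
  | _, _ => false   -- Python raises ValueError here (no ':' to unpack); excluded by Pre_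

-- ===== PORT B =====
-- B-side helper: the 2-way unpack 'x, y = s.split(sep, 1)' (none where Python raises ValueError)
def pvSplit2 (s : String) (sep : String) : Option (String × String) :=
  (PySem.Str.splitMax? s sep 1).bind fun ps =>
    if h : ps.length = 2 then some (ps[0], ps[1]) else none

-- _compile: each config segment becomes a glob token — none (wildcard) or a literal segment
def pvTok (seg : String) : Option String :=
  if PySem.Str.isIn "{" seg && PySem.Str.isIn "}" seg then none else some seg

def pvCompile (config_path : String) : List (Option String) :=
  ((PySem.Str.split? config_path "/").getD []).map pvTok   -- getD unreachable: "/" ≠ ""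

-- the 'while i < len(path) and path[i] != "/"' loop: number of leading non-'/' characters
def pvScan : List Char → Nat
  | [] => 0
  | c :: t => if c = '/' then 0 else pvScan t + 1

-- _glob_match: consume path left to right against the token list (path is never split)
def pvGlob : List (Option String) → List Char → Bool
  | [], _ => false                  -- unreachable: tokens[0] of an empty list (split? never yields [])
  | head :: rest, path =>
    match head with
    | none =>
      let i := pvScan path
      if rest.isEmpty then i == path.length
      else match path.drop i with    -- 'i < len(path) and path[i] == "/"', recurse on path[i+1:]
           | [] => false
           | d :: tail => if d = '/' then pvGlob rest tail else false
    | some lit =>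
      if path.take lit.toList.length = lit.toList then   -- path[:len(head)] == head
        let i := lit.toList.length
        if rest.isEmpty then i == path.length
        else match path.drop i with
             | [] => false
             | d :: tail => if d = '/' then pvGlob rest tail else false
      else false

def is_route_match_py_alt (config_route : String) (actual_route : String) : Bool :=
  match pvSplit2 config_route ":" with
  | none => false   -- Python raises ValueError here (no ':' to unpack); excluded by Pre_
  | some cmcp =>
    match pvSplit2 actual_route ":" with
    | none => false   -- ValueError likewise
    | some amap =>
      if cmcp.1 ≠ amap.1 then false
      else pvGlob (pvCompile cmcp.2) amap.2.toList

-- ===== PRECONDITION & SPEC =====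
-- Pre_ excludes exactly the inputs where either route lacks a ':', on which both Pythons
-- raise ValueError at the 2-way unpack of split(":", 1).
def Pre_is_route_match_py (config_route : String) (actual_route : String) : Prop :=
  PySem.Str.isIn ":" config_route = true ∧ PySem.Str.isIn ":" actual_route = true
instance (config_route : String) (actual_route : String) : Decidable (Pre_is_route_match_py config_route actual_route) := by unfold Pre_is_route_match_py; infer_instance

def pvWitness_is_route_match_py : String × String := ("GET:/users/{id}", "GET:/users/42")

def Spec_is_route_match_py (config_route : String) (actual_route : String) (out : Bool) : Prop := out = is_route_match_py_alt config_route actual_route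
instance (config_route : String) (actual_route : String) (out : Bool) : Decidable (Spec_is_route_match_py config_route actual_route out) := by unfold Spec_is_route_match_py; infer_instance

-- ===== CLAIM (what is proved, stated in full; the proofs are below) =====
def Claim_equal_is_route_match_py : Prop := ∀ (config_route : String) (actual_route : String), Dom_is_route_match_py config_route actual_route → Pre_is_route_match_py config_route actual_route → Spec_is_route_match_py config_route actual_route (is_route_match_py config_route actual_route)

-- ===== LEMMAS AND PROOFS =====

-- ---- A-side: the enumerate loop is the zip-all of the two segment lists ----
lemma pvLoopA_eq_zip_all (c : List String) :
    ∀ (i : Nat) (a : List String), i + c.length ≤ a.length →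
    pvLoopA a i c = ((c.zip (a.drop i)).all (fun p =>
      p.1 == p.2 || (PySem.Str.isIn "{" p.1 && PySem.Str.isIn "}" p.1))) := by
  induction c with
  | nil => intro i a _; rfl
  | cons part rest ih =>
    intro i a h
    have hi : i < a.length := by simp at h; omega
    have hdrop : a.drop i = a[i] :: a.drop (i + 1) := List.drop_eq_getElem_cons hi
    have hget : PySem.List.pyGet? a (i : Int) = some a[i] := by
      rw [PySem.List.pyGet?_natCast]; simp [hi]
    have hrec := ih (i + 1) a (by simp at h ⊢; omega)
    have hstep : pvLoopA a i (part :: rest) =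
        (if PySem.Str.isIn "{" part && PySem.Str.isIn "}" part then pvLoopA a (i + 1) rest
         else match PySem.List.pyGet? a (i : Int) with
              | some ap => if part ≠ ap then false else pvLoopA a (i + 1) rest
              | none => false) := rfl
    rw [hstep, hget, hdrop, List.zip_cons_cons]
    by_cases h1 : PySem.Chars.isIn ['{'] part.toList = true <;>
    by_cases h2 : PySem.Chars.isIn ['}'] part.toList = true <;>
    by_cases he : part = a[i] <;>
    simp [h1, h2, he, hrec]

def pvSplitList : List Char → List (List Char)
  | [] => [[]]
  | c :: t =>
    if c = '/' then [] :: pvSplitList t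
    else match pvSplitList t with
         | [] => [[c]]
         | h :: r => (c :: h) :: r

lemma pvSplitList_ne_nil (l : List Char) : pvSplitList l ≠ [] := by
  cases l with
  | nil => simp [pvSplitList]
  | cons c t =>
    simp only [pvSplitList]
    split
    · simp
    · split <;> simp

lemma splitOn_go_spec : ∀ (fuel : Nat) (l cur : List Char) (acc : List (List Char)),
    l.length ≤ fuel →
    PySem.Chars.splitOn.go ['/'] fuel l cur acc =
      acc.reverse ++ (match pvSplitList l with
                      | [] => [cur.reverse]
                      | h :: r => (cur.reverse ++ h) :: r) := by
  intro fuel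
  induction fuel with
  | zero =>
    intro l cur acc h
    have : l = [] := by cases l <;> simp_all
    subst this
    simp [PySem.Chars.splitOn.go, pvSplitList]
  | succ n ih =>
    intro l cur acc h
    cases l with
    | nil => simp [PySem.Chars.splitOn.go, pvSplitList]
    | cons c t =>
      by_cases hc : c = '/'
      · subst hc
        have hpre : List.isPrefixOf ['/'] ('/' :: t) = true := by simp [List.isPrefixOf]
        rw [show PySem.Chars.splitOn.go ['/'] (n+1) ('/' :: t) cur acc
              = PySem.Chars.splitOn.go ['/'] n (List.drop 1 ('/' :: t)) [] (cur.reverse :: acc) by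
            simp [PySem.Chars.splitOn.go, hpre]]
        rw [ih _ _ _ (by simpa using Nat.lt_succ_iff.mp (by simpa using h))]
        simp [pvSplitList]
        cases hsp : pvSplitList t with
        | nil => exact absurd hsp (pvSplitList_ne_nil t)
        | cons h r => simp
      · have hpre : List.isPrefixOf ['/'] (c :: t) = false := by simp [List.isPrefixOf]; exact Ne.symm hc
        rw [show PySem.Chars.splitOn.go ['/'] (n+1) (c :: t) cur acc
              = PySem.Chars.splitOn.go ['/'] n t (c :: cur) acc by
            simp [PySem.Chars.splitOn.go, hpre]]
        rw [ih _ _ _ (by simp at h ⊢; omega)]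
        simp only [pvSplitList, if_neg hc]
        cases hsp : pvSplitList t with
        | nil => exact absurd hsp (pvSplitList_ne_nil t)
        | cons h r => simp

lemma splitOn_eq_pvSplitList (l : List Char) :
    PySem.Chars.splitOn l ['/'] = pvSplitList l := by
  show PySem.Chars.splitOn.go ['/'] (l.length + 1) l [] [] = _
  rw [splitOn_go_spec (l.length + 1) l [] [] (by omega)]
  cases hsp : pvSplitList l with
  | nil => exact absurd hsp (pvSplitList_ne_nil l)
  | cons h r => simp

lemma pvScan_le (l : List Char) : pvScan l ≤ l.length := by
  induction l with
  | nil => simp [pvScan]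
  | cons c t ih => simp only [pvScan]; split <;> simp <;> omega

lemma drop_pvScan (l : List Char) :
    l.drop (pvScan l) = [] ∨ ∃ t, l.drop (pvScan l) = '/' :: t := by
  induction l with
  | nil => simp [pvScan]
  | cons c t ih =>
    by_cases h : c = '/'
    · right; exact ⟨t, by simp [pvScan, h]⟩
    · simpa [pvScan, h] using ih

lemma pvSplitList_eq_scan (l : List Char) :
    pvSplitList l = l.take (pvScan l) ::
      (match l.drop (pvScan l) with
       | [] => []
       | _ :: tail => pvSplitList tail) := by
  induction l with
  | nil => simp [pvSplitList, pvScan]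
  | cons c t ih =>
    by_cases h : c = '/'
    · simp [pvSplitList, pvScan, h]
    · simp only [pvSplitList, pvScan, if_neg h, List.take_succ_cons, List.drop_succ_cons]
      rw [ih]

lemma mem_pvSplitList_no_slash (l : List Char) :
    ∀ seg ∈ pvSplitList l, '/' ∉ seg := by
  induction l with
  | nil => simp [pvSplitList]
  | cons c t ih =>
    by_cases h : c = '/'
    · simp only [pvSplitList, if_pos h]
      intro seg hseg
      rcases List.mem_cons.mp hseg with rfl | hm
      · simp
      · exact ih seg hm
    · simp only [pvSplitList, if_neg h]
      cases hsp : pvSplitList t with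
      | nil => exact absurd hsp (pvSplitList_ne_nil t)
      | cons hd r =>
        intro seg hseg
        rcases List.mem_cons.mp hseg with rfl | hm
        · intro hc
          rcases List.mem_cons.mp hc with rfl | hc2
          · exact h rfl
          · exact ih hd (by rw [hsp]; exact List.mem_cons_self ..) hc2
        · exact ih seg (by rw [hsp]; exact List.mem_cons_of_mem _ hm)

lemma scan_ge_of_prefix (lit l : List Char) (hp : l.take lit.length = lit)
    (hs : '/' ∉ lit) : lit.length ≤ pvScan l := by
  induction lit generalizing l with
  | nil => simp
  | cons a b ih =>
    cases l with
    | nil => simp at hp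
    | cons c t =>
      simp only [List.length_cons, List.take_succ_cons, List.cons.injEq] at hp
      obtain ⟨rfl, hp2⟩ := hp
      have ha : c ≠ '/' := fun h => hs (h ▸ List.mem_cons_self ..)
      simp only [pvScan, if_neg ha, List.length_cons]
      have := ih t hp2 (fun h => hs (List.mem_cons_of_mem _ h))
      omega

lemma drop_lt_scan (l : List Char) (j : Nat) (hj : j < pvScan l) :
    ∃ d t, l.drop j = d :: t ∧ d ≠ '/' := by
  induction l generalizing j with
  | nil => simp [pvScan] at hj
  | cons c t ih =>
    by_cases h : c = '/'
    · simp [pvScan, h] at hj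
    · cases j with
      | zero => exact ⟨c, t, rfl, h⟩
      | succ j' =>
        simp only [pvScan, if_neg h] at hj
        rw [List.drop_succ_cons]
        exact ih j' (by omega)

lemma pvGlob_eq (cs : List String) :
    ∀ path : List Char, cs ≠ [] →
    (∀ seg ∈ cs, '/' ∉ seg.toList) →
    pvGlob (cs.map pvTok) path =
      (cs.length == (pvSplitList path).length &&
       (cs.zip ((pvSplitList path).map String.ofList)).all (fun p =>
         p.1 == p.2 || (PySem.Str.isIn "{" p.1 && PySem.Str.isIn "}" p.1))) := by
  induction cs with
  | nil => intro path h _; exact absurd rfl h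
  | cons c cs' ih =>
    intro path _ hns
    have hseg : '/' ∉ c.toList := hns c (List.mem_cons_self ..)
    have hsp := pvSplitList_eq_scan path
    have hle := pvScan_le path
    have hcont : (if (cs'.map pvTok).isEmpty then (pvScan path == path.length : Bool)
                  else match path.drop (pvScan path) with
                       | [] => false
                       | d :: tail => if d = '/' then pvGlob (cs'.map pvTok) tail else false) =
        (cs'.length == (match path.drop (pvScan path) with
                        | [] => ([] : List (List Char))
                        | _ :: tail => pvSplitList tail).length &&
         (cs'.zip ((match path.drop (pvScan path) with
                    | [] => ([] : List (List Char))
                    | _ :: tail => pvSplitList tail).map String.ofList)).all (fun p =>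
           p.1 == p.2 || (PySem.Str.isIn "{" p.1 && PySem.Str.isIn "}" p.1))) := by
      rcases drop_pvScan path with hd | ⟨tail, hd⟩
      · have hilen : pvScan path = path.length := by
          have := List.drop_eq_nil_iff.mp hd; omega
        cases cs' with
        | nil => simp [hd, hilen]
        | cons c2 r2 => simp [hd, hilen]
      · have hlt : pvScan path < path.length := by
          have hld : (path.drop (pvScan path)).length = path.length - pvScan path :=
            List.length_drop ..
          rw [hd] at hld; simp at hld; omega
        cases cs' with
        | nil =>
          cases htl : pvSplitList tail with
          | nil => exact absurd htl (pvSplitList_ne_nil tail)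
          | cons x xs => simp [hd, htl, Nat.ne_of_lt hlt]
        | cons c2 r2 =>
          rw [hd]
          have hhyp : ∀ seg ∈ c2 :: r2, '/' ∉ seg.toList :=
            fun seg hm => hns seg (List.mem_cons_of_mem _ hm)
          simp only [List.map_cons, List.isEmpty_cons, if_false, Bool.false_eq_true]
          rw [show (pvTok c2 :: List.map pvTok r2) = (c2 :: r2).map pvTok from rfl,
              ih tail (by simp) hhyp]
          simp
    rw [List.map_cons]
    by_cases hp : (PySem.Str.isIn "{" c && PySem.Str.isIn "}" c) = true
    · -- wildcard token
      have hp' : (PySem.Chars.isIn ['{'] c.toList && PySem.Chars.isIn ['}'] c.toList) = true := by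
        simpa using hp
      rw [show pvTok c = none from by simp [pvTok, hp']]
      rw [show pvGlob (none :: cs'.map pvTok) path =
            (if (cs'.map pvTok).isEmpty then (pvScan path == path.length : Bool)
             else match path.drop (pvScan path) with
                  | [] => false
                  | d :: tail => if d = '/' then pvGlob (cs'.map pvTok) tail else false) from rfl]
      rw [hcont, hsp]
      simp [hp']
    · -- literal token
      have hpF : (PySem.Chars.isIn ['{'] c.toList && PySem.Chars.isIn ['}'] c.toList) = false := by
        simpa using hp
      rw [show pvTok c = some c from by simp [pvTok, hpF]]
      rw [show pvGlob (some c :: cs'.map pvTok) path =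
            (if path.take c.toList.length = c.toList then
               (if (cs'.map pvTok).isEmpty then (c.toList.length == path.length : Bool)
                else match path.drop c.toList.length with
                     | [] => false
                     | d :: tail => if d = '/' then pvGlob (cs'.map pvTok) tail else false)
             else false) from rfl]
      by_cases htake : path.take c.toList.length = c.toList
      · have hle2 : c.toList.length ≤ pvScan path := scan_ge_of_prefix _ _ htake hseg
        rcases eq_or_lt_of_le hle2 with heq | hlt2
        · have hcseg : path.take (pvScan path) = c.toList := by rw [← heq]; exact htake
          rw [if_pos htake, heq, hcont, hsp]
          have hcb : (c == String.ofList (path.take (pvScan path))) = true := by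
            rw [hcseg]; simp [String.ofList_toList]
          simp [hcb]
        · have hcne : (c == String.ofList (path.take (pvScan path))) = false := by
            apply beq_eq_false_iff_ne.mpr
            intro h
            have hc : c.toList = path.take (pvScan path) := by rw [h, String.toList_ofList]
            have hlen : c.toList.length = pvScan path := by
              rw [hc, List.length_take, Nat.min_eq_left hle]
            omega
          rw [if_pos htake]
          have hlf : (if (cs'.map pvTok).isEmpty then (c.toList.length == path.length : Bool)
                      else match path.drop c.toList.length with
                           | [] => false
                           | d :: tail => if d = '/' then pvGlob (cs'.map pvTok) tail else false) = false := by
            cases cs' with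
            | nil =>
              have hcl : c.toList.length = c.length := by simp
              simp
              omega
            | cons c2 r2 =>
              obtain ⟨d, t, hdt, hdne⟩ := drop_lt_scan path c.toList.length hlt2
              simp only [List.map_cons, List.isEmpty_cons, if_false, Bool.false_eq_true, hdt]
              simp [hdne]
          rw [hlf, hsp]
          simp [hcne, hpF]
      · rw [if_neg htake]
        have hcne : (c == String.ofList (path.take (pvScan path))) = false := by
          apply beq_eq_false_iff_ne.mpr
          intro h
          apply htake
          have hc : c.toList = path.take (pvScan path) := by rw [h, String.toList_ofList]
          have hlen : c.toList.length = pvScan path := by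
            rw [hc, List.length_take, Nat.min_eq_left hle]
          rw [hlen, ← hc]
        rw [hsp]
        simp [hcne, hpF]

lemma split?_slash (s : String) :
    PySem.Str.split? s "/" = some ((pvSplitList s.toList).map String.ofList) := by
  simp [PySem.Str.split?, PySem.Chars.split?, splitOn_eq_pvSplitList]

lemma alt_glob_eq_ref (cp ap : String) :
    pvGlob (pvCompile cp) ap.toList =
      (((PySem.Str.split? cp "/").getD []).length ==
         ((PySem.Str.split? ap "/").getD []).length &&
       ((((PySem.Str.split? cp "/").getD []).zip
          ((PySem.Str.split? ap "/").getD [])).all (fun p =>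
         p.1 == p.2 || (PySem.Str.isIn "{" p.1 && PySem.Str.isIn "}" p.1)))) := by
  rw [pvCompile, split?_slash, split?_slash]
  simp only [Option.getD_some]
  have hne : (pvSplitList cp.toList).map String.ofList ≠ [] := by
    simp [pvSplitList_ne_nil]
  have hhyp : ∀ seg ∈ (pvSplitList cp.toList).map String.ofList, '/' ∉ seg.toList := by
    intro seg hm
    obtain ⟨seg', hm', rfl⟩ := List.mem_map.mp hm
    rw [String.toList_ofList]
    exact mem_pvSplitList_no_slash _ seg' hm'
  rw [pvGlob_eq _ ap.toList hne hhyp]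
  simp

-- ===== VERDICT (by name: the statement is the Claim_ definition above) =====
theorem is_route_match_py_spec : Claim_equal_is_route_match_py := by
  intro config_route actual_route _ _
  unfold Spec_is_route_match_py is_route_match_py is_route_match_py_alt pvSplit2
  cases hc : PySem.Str.splitMax? config_route ":" 1 with
  | none => simp
  | some cl =>
    cases ha : PySem.Str.splitMax? actual_route ":" 1 with
    | none =>
      cases cl with
      | nil => simp
      | cons cm cl1 =>
        cases cl1 with
        | nil => simp
        | cons cp cl2 => cases cl2 <;> simp
    | some al =>
      cases cl with
      | nil => simp
      | cons cm cl1 =>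
        cases cl1 with
        | nil => simp
        | cons cp cl2 =>
          cases cl2 with
          | cons x xs => simp
          | nil =>
            cases al with
            | nil => simp
            | cons am al1 =>
              cases al1 with
              | nil => simp
              | cons ap al2 =>
                cases al2 with
                | cons y ys => simp
                | nil =>
                  change (if cm ≠ am then false
                      else match PySem.Str.split? cp "/", PySem.Str.split? ap "/" with
                           | some config_parts, some actual_parts =>
                             if config_parts.length ≠ actual_parts.length then false
                             else pvLoopA actual_parts 0 config_parts
                           | _, _ => false) =
                      (if cm ≠ am then false else pvGlob (pvCompile cp) ap.toList)
                  rw [split?_slash cp, split?_slash ap]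
                  have hB : pvGlob (pvCompile cp) ap.toList =
                      (((pvSplitList cp.toList).map String.ofList).length ==
                         ((pvSplitList ap.toList).map String.ofList).length &&
                       ((((pvSplitList cp.toList).map String.ofList).zip
                          ((pvSplitList ap.toList).map String.ofList)).all (fun p =>
                         p.1 == p.2 || (PySem.Str.isIn "{" p.1 && PySem.Str.isIn "}" p.1)))) := by
                    rw [alt_glob_eq_ref, split?_slash, split?_slash]
                    simp
                  by_cases hm : cm = am
                  · by_cases hl : (pvSplitList cp.toList).length = (pvSplitList ap.toList).length
                    · have hz := pvLoopA_eq_zip_all ((pvSplitList cp.toList).map String.ofList) 0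
                        ((pvSplitList ap.toList).map String.ofList) (by simp [hl])
                      simp [hm, hl, hz, hB]
                    · simp [hm, hl, hB]
                  · simp [hm, hB]
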